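-- pv_equiv track=rewrite | github.com/archishmanghos/DSA-Contests | Interviews/GFG/random-problems/Medium/LCM-Triplet/LCM-Triplet.py | lcmTriplets
-- ===== SOURCE A (Python) =====
-- import math
--
-- def lcmTriplets(N):
--     if N % 6 == 0:
--         return (N - 1) * (N - 2) * (N - 3)
--     if N <= 2:
--         return N
--
--     ans = N * (N - 1)
--     for i in range(N - 2, 0, -1):
--         if math.gcd(ans, i) == 1:
--             ans *= i
--             break
--
--     return ans
-- ===== SOURCE B (Python) =====
-- def lcmTriplets(N):
--     if N % 6 == 0:
--         return (N - 1) * (N - 2) * (N - 3)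
--     if N <= 2:
--         return N
--     if N % 2 == 1:
--         return N * (N - 1) * (N - 2)
--     return N * (N - 1) * (N - 3)
-- ===== Notes on version B (the rewrite author's own statement) =====
-- stated objective: simpler
-- what changed: Replaces the gcd-search loop (and the math import) with a direct parity case analysis: for N not divisible by 6 and N >= 3, the answer is N*(N-1)*(N-2) when N is odd and N*(N-1)*(N-3) when N is even, returned as a closed form with no loop.
import Mathlib
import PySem

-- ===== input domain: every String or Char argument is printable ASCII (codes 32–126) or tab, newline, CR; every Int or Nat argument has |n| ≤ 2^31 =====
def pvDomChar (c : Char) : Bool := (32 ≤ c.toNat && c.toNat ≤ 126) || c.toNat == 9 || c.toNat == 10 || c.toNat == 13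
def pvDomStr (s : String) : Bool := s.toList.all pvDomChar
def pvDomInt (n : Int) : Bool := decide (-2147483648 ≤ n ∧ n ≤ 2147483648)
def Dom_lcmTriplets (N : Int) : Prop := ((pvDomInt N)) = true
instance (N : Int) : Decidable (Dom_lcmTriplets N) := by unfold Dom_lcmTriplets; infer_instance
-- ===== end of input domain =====

-- B replaces A's descending gcd-search loop with a closed-form parity case analysis (simpler, no loop).

-- ===== PORT A =====
-- A's 'for i in range(N-2, 0, -1): if math.gcd(ans, i) == 1: ans *= i; break' loop,
-- as the countdown recursion range() iterates lazily (i runs N-2, N-3, …, 1; break = stop)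
def lcmLoopA (ans i : Int) : Int :=
  if 0 < i then
    if Int.gcd ans i = 1 then ans * i else lcmLoopA ans (i - 1)
  else ans
termination_by i.toNat
decreasing_by omega

def lcmTriplets (N : Int) : Int :=
  if PySem.Int.mod N 6 = 0 then (N - 1) * (N - 2) * (N - 3)
  else if N ≤ 2 then N
  else lcmLoopA (N * (N - 1)) (N - 2)

-- ===== PORT B =====
def lcmTriplets_alt (N : Int) : Int :=
  if PySem.Int.mod N 6 = 0 then (N - 1) * (N - 2) * (N - 3)
  else if N ≤ 2 then N
  else if PySem.Int.mod N 2 = 1 then N * (N - 1) * (N - 2)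
  else N * (N - 1) * (N - 3)

-- ===== PRECONDITION & SPEC =====
def Spec_lcmTriplets (N : Int) (out : Int) : Prop := out = lcmTriplets_alt N
instance (N : Int) (out : Int) : Decidable (Spec_lcmTriplets N out) := by unfold Spec_lcmTriplets; infer_instance

-- ===== CLAIM (what is proved, stated in full; the proofs are below) =====
def Claim_equal_lcmTriplets : Prop := ∀ (N : Int), Dom_lcmTriplets N → Spec_lcmTriplets N (lcmTriplets N)

-- ===== LEMMAS AND PROOFS =====

-- gcd(m*(m-1), m-2) = 1 for odd m ≥ 3
theorem pv_gcd_odd (m : ℕ) (h3 : 3 ≤ m) (hodd : m % 2 = 1) :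
    Nat.gcd (m * (m - 1)) (m - 2) = 1 := by
  obtain ⟨d, rfl⟩ : ∃ d, m = d + 2 := ⟨m - 2, by omega⟩
  have c1 : Nat.Coprime (d + 2) d :=
    Nat.coprime_self_add_left.mpr (Nat.coprime_two_left.mpr (Nat.odd_iff.mpr (by omega)))
  have c2 : Nat.Coprime (d + 1) d :=
    Nat.coprime_self_add_left.mpr (Nat.coprime_one_left d)
  have : Nat.Coprime ((d + 2) * (d + 1)) d := Nat.Coprime.mul_left c1 c2
  simpa using this

-- gcd(m*(m-1), m-2) ≠ 1 for even m ≥ 4 (2 divides both)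
theorem pv_gcd_even_ne (m : ℕ) (h4 : 4 ≤ m) (heven : m % 2 = 0) :
    Nat.gcd (m * (m - 1)) (m - 2) ≠ 1 := by
  intro h1
  have hdvd : 2 ∣ Nat.gcd (m * (m - 1)) (m - 2) :=
    Nat.dvd_gcd (Dvd.dvd.mul_right (by omega) _) (by omega)
  rw [h1] at hdvd
  omega

-- gcd(m*(m-1), m-3) = 1 for even m ≥ 4 with 3 ∤ m
theorem pv_gcd_even3 (m : ℕ) (h4 : 4 ≤ m) (heven : m % 2 = 0) (h3 : ¬ (3 ∣ m)) :
    Nat.gcd (m * (m - 1)) (m - 3) = 1 := by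
  obtain ⟨d, rfl⟩ : ∃ d, m = d + 3 := ⟨m - 3, by omega⟩
  have c1 : Nat.Coprime (d + 3) d :=
    Nat.coprime_self_add_left.mpr
      ((Nat.Prime.coprime_iff_not_dvd (by norm_num)).mpr (by omega))
  have c2 : Nat.Coprime (d + 2) d :=
    Nat.coprime_self_add_left.mpr (Nat.coprime_two_left.mpr (Nat.odd_iff.mpr (by omega)))
  have : Nat.Coprime ((d + 3) * (d + 2)) d := Nat.Coprime.mul_left c1 c2
  simpa using this

-- Int versions at the arguments the loop sees
theorem pv_igcd_odd (N : Int) (h3 : 3 ≤ N) (hodd : N % 2 = 1) :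
    Int.gcd (N * (N - 1)) (N - 2) = 1 := by
  have h : Int.gcd (N * (N - 1)) (N - 2)
      = Nat.gcd (N.natAbs * (N - 1).natAbs) ((N - 2).natAbs) := by
    simp [Int.gcd, Int.natAbs_mul]
  rw [h]
  have e1 : (N - 1).natAbs = N.natAbs - 1 := by omega
  have e2 : (N - 2).natAbs = N.natAbs - 2 := by omega
  rw [e1, e2]
  exact pv_gcd_odd N.natAbs (by omega) (by omega)

theorem pv_igcd_even_ne (N : Int) (h4 : 4 ≤ N) (heven : N % 2 = 0) :
    ¬ Int.gcd (N * (N - 1)) (N - 2) = 1 := by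
  have h : Int.gcd (N * (N - 1)) (N - 2)
      = Nat.gcd (N.natAbs * (N - 1).natAbs) ((N - 2).natAbs) := by
    simp [Int.gcd, Int.natAbs_mul]
  rw [h]
  have e1 : (N - 1).natAbs = N.natAbs - 1 := by omega
  have e2 : (N - 2).natAbs = N.natAbs - 2 := by omega
  rw [e1, e2]
  exact pv_gcd_even_ne N.natAbs (by omega) (by omega)

theorem pv_igcd_even3 (N : Int) (h4 : 4 ≤ N) (heven : N % 2 = 0) (h3 : ¬ ((3:Int) ∣ N)) :
    Int.gcd (N * (N - 1)) (N - 3) = 1 := by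
  have h : Int.gcd (N * (N - 1)) (N - 3)
      = Nat.gcd (N.natAbs * (N - 1).natAbs) ((N - 3).natAbs) := by
    simp [Int.gcd, Int.natAbs_mul]
  rw [h]
  have e1 : (N - 1).natAbs = N.natAbs - 1 := by omega
  have e2 : (N - 3).natAbs = N.natAbs - 3 := by omega
  rw [e1, e2]
  exact pv_gcd_even3 N.natAbs (by omega) (by omega) (by omega)

-- ===== VERDICT (by name: the statement is the Claim_ definition above) =====
theorem lcmTriplets_spec : Claim_equal_lcmTriplets := by
  intro N _
  unfold Spec_lcmTriplets lcmTriplets lcmTriplets_alt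
  have hmod2 : PySem.Int.mod N 2 = N % 2 := PySem.Int.mod_eq_emod_of_pos (by omega)
  split_ifs with h6 h2 hodd
  · rfl
  · rfl
  · -- N odd, N ≥ 3: the loop takes i = N-2 at once
    rw [hmod2] at hodd
    have h3 : 3 ≤ N := by omega
    rw [lcmLoopA, if_pos (by omega : (0:Int) < N - 2), if_pos (pv_igcd_odd N h3 hodd)]
  · -- N even, not divisible by 6, N ≥ 3 (hence ≥ 4): i = N-2 fails, i = N-3 succeeds
    rw [hmod2] at hodd
    have heven : N % 2 = 0 := by omega
    have h4 : 4 ≤ N := by omega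
    have h3d : ¬ ((3:Int) ∣ N) := by
      intro hd
      exact h6 ((PySem.Int.mod_eq_zero_iff_dvd N 6).mpr (by omega))
    rw [lcmLoopA, if_pos (by omega : (0:Int) < N - 2), if_neg (pv_igcd_even_ne N h4 heven)]
    have e : N - 2 - 1 = N - 3 := by ring
    rw [e, lcmLoopA, if_pos (by omega : (0:Int) < N - 3), if_pos (pv_igcd_even3 N h4 heven h3d)]
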